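-- pv_equiv track=rewrite | github.com/AzizHax/RAGAGENTICLLM | case_generator/generator.py | allocate_stay_ids
-- ===== SOURCE A (Python) =====
-- from typing import Dict, Any, List, Tuple, Optional
--
-- def allocate_stay_ids(stays_plan: Dict[str, int]) -> Dict[str, List[str]]:
--     all_patients = sorted(stays_plan.keys())
--     stay_counter = 1
--     alloc: Dict[str, List[str]] = {}
--     for pid in all_patients:
--         alloc[pid] = []
--         for _ in range(stays_plan[pid]):
--             alloc[pid].append(f"S{stay_counter:04d}")
--             stay_counter += 1
--     return alloc
-- ===== SOURCE B (Python) =====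
-- from typing import Dict, List
--
--
-- def allocate_stay_ids(stays_plan: Dict[str, int]) -> Dict[str, List[str]]:
--     pids = sorted(stays_plan.keys())
--     # Pass 1: prefix-offset table -- first stay number of each patient.
--     starts: Dict[str, int] = {}
--     next_start = 1
--     for pid in pids:
--         starts[pid] = next_start
--         next_start += max(stays_plan[pid], 0)
--     # Pass 2: build each patient's block independently by arithmetic.
--     return {
--         pid: ["S%04d" % i for i in range(starts[pid], starts[pid] + stays_plan[pid])]
--         for pid in pids
--     }
-- ===== Notes on version B (the rewrite author's own statement) =====
-- stated objective: alternative
-- what changed: Replaces A's single pass that threads a mutable stay counter through nested append loops by two independent passes: first a prefix-offset table giving each sorted patient its first stay number, then a comprehension building each patient's block by range arithmetic from that table.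
import Mathlib
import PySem

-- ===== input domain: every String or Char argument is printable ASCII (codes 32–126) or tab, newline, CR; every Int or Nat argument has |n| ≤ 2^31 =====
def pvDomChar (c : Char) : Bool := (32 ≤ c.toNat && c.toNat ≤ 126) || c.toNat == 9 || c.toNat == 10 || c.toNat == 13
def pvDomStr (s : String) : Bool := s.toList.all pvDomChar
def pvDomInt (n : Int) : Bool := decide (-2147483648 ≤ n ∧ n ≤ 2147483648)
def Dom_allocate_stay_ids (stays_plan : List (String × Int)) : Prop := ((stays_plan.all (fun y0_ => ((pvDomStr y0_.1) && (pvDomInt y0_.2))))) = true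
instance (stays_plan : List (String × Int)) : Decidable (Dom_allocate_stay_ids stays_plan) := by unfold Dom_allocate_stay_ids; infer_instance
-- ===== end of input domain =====

-- B replaces A's threaded mutable counter by a prefix-offset table plus an independent
-- arithmetic pass (objective: alternative decomposition, same cost).

-- shared helper: f"S{n:04d}" / "S%04d" % n (exact for n ≥ 1, the only values formatted)
def pvFmt (n : Int) : String := "S" ++ PySem.Str.zfill (PySem.Int.toStr n) 4

-- ===== PORT A =====
-- stays_plan[pid] with pid drawn from the dict's keys: always present, so getD is exact.
def allocate_stay_ids (stays_plan : List (String × Int)) : List (String × List String) :=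
  let d := PySem.Dict.ofList stays_plan
  let all_patients := PySem.List.sorted d.keys (fun x => x) false
  let st := all_patients.foldl
    (fun (st : PySem.Dict String (List String) × Int) pid =>
      let st := (st.1.insert pid [], st.2)
      (PySem.List.pyRange 0 (d.getD pid 0) 1).foldl
        (fun st _ => (st.1.modify pid [] (fun l => l ++ [pvFmt st.2]), st.2 + 1)) st)
    (PySem.Dict.empty, 1)
  st.1.items

-- ===== PORT B =====
def allocate_stay_ids_alt (stays_plan : List (String × Int)) : List (String × List String) :=
  let d := PySem.Dict.ofList stays_plan
  let pids := PySem.List.sorted d.keys (fun x => x) false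
  let starts := (pids.foldl
    (fun (st : PySem.Dict String Int × Int) pid =>
      (st.1.insert pid st.2, st.2 + max (d.getD pid 0) 0))
    (PySem.Dict.empty, 1)).1
  pids.map (fun pid =>
    (pid, (PySem.List.pyRange (starts.getD pid 0) (starts.getD pid 0 + d.getD pid 0) 1).map pvFmt))

-- ===== PRECONDITION & SPEC =====
def Spec_allocate_stay_ids (stays_plan : List (String × Int)) (out : List (String × List String)) : Prop := out = allocate_stay_ids_alt stays_plan
instance (stays_plan : List (String × Int)) (out : List (String × List String)) : Decidable (Spec_allocate_stay_ids stays_plan out) := by unfold Spec_allocate_stay_ids; infer_instance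

-- ===== CLAIM (what is proved, stated in full; the proofs are below) =====
def Claim_equal_allocate_stay_ids : Prop := ∀ (stays_plan : List (String × Int)), Dom_allocate_stay_ids stays_plan → Spec_allocate_stay_ids stays_plan (allocate_stay_ids stays_plan)

-- ===== LEMMAS AND PROOFS =====

-- the common shape: each patient in order gets the block of ids starting at c
def pvSpec (cnt : String → Int) (c : Int) : List String → List (String × List String)
  | [] => []
  | p :: ps =>
      (p, (PySem.List.pyRange c (c + cnt p) 1).map pvFmt) :: pvSpec cnt (c + max (cnt p) 0) ps

theorem pv_modify_insert {d : PySem.Dict String (List String)} {k : String} {v d0 f} :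
    (d.insert k v).modify k d0 f = d.insert k (f v) := by
  simp [PySem.Dict.modify, PySem.Dict.getD_insert_self, PySem.Dict.insert_insert_self]

-- A's inner append loop, run on a freshly inserted key, extends that key's block
theorem pv_inner (pid : String) (l : List Int) :
    ∀ (b : PySem.Dict String (List String)) (acc : List String) (c : Int),
    l.foldl (fun st _ => (st.1.modify pid [] (fun s => s ++ [pvFmt st.2]), st.2 + 1))
        (b.insert pid acc, c)
      = (b.insert pid (acc ++ (PySem.List.pyRange c (c + l.length) 1).map pvFmt),
         c + l.length) := by
  induction l with
  | nil => intro b acc c; simp [PySem.List.pyRange_one_eq_nil]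
  | cons x xs ih =>
      intro b acc c
      simp only [List.foldl_cons, pv_modify_insert]
      rw [ih b (acc ++ [pvFmt c]) (c + 1)]
      have hb : c + 1 + (xs.length : Int) = c + ((x :: xs).length : Int) := by
        simp only [List.length_cons]; push_cast; omega
      rw [hb]
      rw [PySem.List.pyRange_one_cons (show c < c + ((x :: xs).length : Int) by
        simp only [List.length_cons]; push_cast; omega)]
      simp

-- the degenerate/negative-count ranges coincide after toNat
theorem pv_range_toNat (c n : Int) :
    PySem.List.pyRange c (c + ((n - 0).toNat : Int)) 1 = PySem.List.pyRange c (c + n) 1 := by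
  by_cases h : 0 ≤ n
  · congr 2; omega
  · rw [PySem.List.pyRange_one_eq_nil (by omega), PySem.List.pyRange_one_eq_nil (by omega)]

-- A's outer fold produces exactly the pvSpec blocks appended to the accumulator
theorem pv_outer (cnt : String → Int) (pids : List String) :
    ∀ (a : PySem.Dict String (List String)) (c : Int),
    pids.Nodup → (∀ p ∈ pids, a.contains p = false) →
    ((pids.foldl
      (fun (st : PySem.Dict String (List String) × Int) pid =>
        (PySem.List.pyRange 0 (cnt pid) 1).foldl
          (fun st _ => (st.1.modify pid [] (fun l => l ++ [pvFmt st.2]), st.2 + 1))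
          (st.1.insert pid [], st.2))
      (a, c)).1).items = a.items ++ pvSpec cnt c pids := by
  induction pids with
  | nil => intro a c _ _; simp [pvSpec]
  | cons p ps ih =>
      intro a c hnd hfresh
      simp only [List.foldl_cons]
      rw [pv_inner p _ a [] c]
      rw [ih _ (c + ((PySem.List.pyRange 0 (cnt p) 1).length : Int))
            (List.Nodup.of_cons hnd)
            (by
              intro q hq
              rw [PySem.Dict.contains_insert]
              have hqp : q ≠ p := by
                rintro rfl; exact (List.nodup_cons.mp hnd).1 hq
              simp [hqp, hfresh q (List.mem_cons_of_mem _ hq)])]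
      rw [PySem.Dict.items_insert, pvSpec,
          PySem.List.length_pyRange_one, pv_range_toNat]
      rw [show c + (((cnt p - 0).toNat : Int)) = c + max (cnt p) 0 by omega]
      simp [hfresh p List.mem_cons_self]

-- B's starts fold never touches a key outside the patients it processes
theorem pv_starts_getD_frozen (cnt : String → Int) (ps : List String) (p : String)
    (hp : p ∉ ps) :
    ∀ (e : PySem.Dict String Int) (c : Int),
    ((ps.foldl (fun (st : PySem.Dict String Int × Int) pid =>
        (st.1.insert pid st.2, st.2 + max (cnt pid) 0)) (e, c)).1).getD p 0 = e.getD p 0 := by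
  induction ps with
  | nil => intro e c; rfl
  | cons q qs ih =>
      intro e c
      simp only [List.foldl_cons]
      rw [ih (fun h => hp (List.mem_cons_of_mem _ h))]
      rw [PySem.Dict.getD_insert]
      have : p ≠ q := fun h => hp (h ▸ List.mem_cons_self)
      simp [this]

-- B's second pass, read through the starts table, is pvSpec
theorem pv_b_spec (cnt : String → Int) (pids : List String) :
    ∀ (e : PySem.Dict String Int) (c : Int),
    pids.Nodup →
    pids.map (fun pid =>
      (pid,
        (PySem.List.pyRange
          (((pids.foldl (fun (st : PySem.Dict String Int × Int) pid =>
              (st.1.insert pid st.2, st.2 + max (cnt pid) 0)) (e, c)).1).getD pid 0)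
          (((pids.foldl (fun (st : PySem.Dict String Int × Int) pid =>
              (st.1.insert pid st.2, st.2 + max (cnt pid) 0)) (e, c)).1).getD pid 0 + cnt pid)
          1).map pvFmt)) = pvSpec cnt c pids := by
  induction pids with
  | nil => intro e c _; rfl
  | cons p ps ih =>
      intro e c hnd
      have hps : p ∉ ps := (List.nodup_cons.mp hnd).1
      simp only [List.map_cons, List.foldl_cons]
      rw [pvSpec]
      have h1 : ((ps.foldl (fun (st : PySem.Dict String Int × Int) pid =>
          (st.1.insert pid st.2, st.2 + max (cnt pid) 0))
            (e.insert p c, c + max (cnt p) 0)).1).getD p 0 = c := by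
        rw [pv_starts_getD_frozen cnt ps p hps, PySem.Dict.getD_insert_self]
      rw [h1]
      exact congrArg₂ List.cons rfl (ih (e.insert p c) (c + max (cnt p) 0) (List.Nodup.of_cons hnd))

-- ===== VERDICT (by name: the statement is the Claim_ definition above) =====
theorem allocate_stay_ids_spec : Claim_equal_allocate_stay_ids := by
  intro sp _
  unfold Spec_allocate_stay_ids allocate_stay_ids allocate_stay_ids_alt
  set d := PySem.Dict.ofList sp with hd
  have hnd : (PySem.List.sorted d.keys (fun x => x) false).Nodup :=
    (PySem.List.sorted_perm _ _ _).nodup_iff.mpr (PySem.Dict.nodup_keys_ofList sp)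
  rw [pv_outer (fun pid => d.getD pid 0) _ PySem.Dict.empty 1 hnd
        (fun p _ => PySem.Dict.contains_empty p),
      pv_b_spec (fun pid => d.getD pid 0) _ PySem.Dict.empty 1 hnd]
  simp [PySem.Dict.empty]
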